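-- pv_equiv track=rewrite | github.com/Sam-Emma/Credit-Scoring | main1.py | calculate_character_credit_score
-- ===== SOURCE A (Python) =====
-- def calculate_character_credit_score(crops_cultivated, fertilization_frequency, airtime_spent_weekly, bank_account_balance, highest_transaction):
--     score = 0
--
--     # Crops Cultivated
--     crops_points = {
--         "Legumes": 10,
--         "Cereals": 8,
--         "Fruits": 6,
--         "Tubers": 4
--     }
--     for crop in crops_cultivated:
--         if crop in crops_points:
--             score += crops_points[crop]
--
--     # Frequency of Fertilization
--     if fertilization_frequency <= 2:
--         score += 2
--     elif fertilization_frequency <= 4: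
--         score += 4
--     elif fertilization_frequency <= 6:
--         score += 6
--     else:
--         score += 8
--
--     # Average Amount Spent on Airtime Weekly
--     if airtime_spent_weekly <= 500:
--         score += 1
--     elif airtime_spent_weekly <= 1000:
--         score += 2
--     elif airtime_spent_weekly <= 2000:
--         score += 3
--     else:
--         score += 4
--
--     # Average Bank Account Balance
--     if bank_account_balance <= 5000:
--         score += 1
--     elif bank_account_balance <= 10000:
--         score += 2
--     elif bank_account_balance <= 20000:
--         score += 3
--     else:
--         score += 4
--
--     # Highest Transaction Ever
--     if highest_transaction <= 10000:
--         score += 1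
--     elif highest_transaction <= 50000:
--         score += 2
--     elif highest_transaction <= 100000:
--         score += 3
--     else:
--         score += 4
--
--     return score
-- ===== SOURCE B (Python) =====
-- CROP_POINTS = {"Legumes": 10, "Cereals": 8, "Fruits": 6, "Tubers": 4}
--
-- def _band(value, thresholds, points):
--     # index = number of thresholds strictly below value (bisect_left semantics)
--     return points[sum(1 for t in thresholds if t < value)]
--
-- def calculate_character_credit_score(crops_cultivated, fertilization_frequency, airtime_spent_weekly, bank_account_balance, highest_transaction):
--     return (sum(CROP_POINTS.get(c, 0) for c in crops_cultivated)
--             + _band(fertilization_frequency, [2, 4, 6], [2, 4, 6, 8])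
--             + _band(airtime_spent_weekly, [500, 1000, 2000], [1, 2, 3, 4])
--             + _band(bank_account_balance, [5000, 10000, 20000], [1, 2, 3, 4])
--             + _band(highest_transaction, [10000, 50000, 100000], [1, 2, 3, 4]))
-- ===== Notes on version B (the rewrite author's own statement) =====
-- stated objective: simpler
-- what changed: Replaces the four hand-written if/elif ladders by one shared threshold-table helper (points indexed by the count of thresholds below the value) and replaces the membership-guarded crop loop by a single sum over dict.get, returning one arithmetic expression with no mutable accumulator.
import Mathlib
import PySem

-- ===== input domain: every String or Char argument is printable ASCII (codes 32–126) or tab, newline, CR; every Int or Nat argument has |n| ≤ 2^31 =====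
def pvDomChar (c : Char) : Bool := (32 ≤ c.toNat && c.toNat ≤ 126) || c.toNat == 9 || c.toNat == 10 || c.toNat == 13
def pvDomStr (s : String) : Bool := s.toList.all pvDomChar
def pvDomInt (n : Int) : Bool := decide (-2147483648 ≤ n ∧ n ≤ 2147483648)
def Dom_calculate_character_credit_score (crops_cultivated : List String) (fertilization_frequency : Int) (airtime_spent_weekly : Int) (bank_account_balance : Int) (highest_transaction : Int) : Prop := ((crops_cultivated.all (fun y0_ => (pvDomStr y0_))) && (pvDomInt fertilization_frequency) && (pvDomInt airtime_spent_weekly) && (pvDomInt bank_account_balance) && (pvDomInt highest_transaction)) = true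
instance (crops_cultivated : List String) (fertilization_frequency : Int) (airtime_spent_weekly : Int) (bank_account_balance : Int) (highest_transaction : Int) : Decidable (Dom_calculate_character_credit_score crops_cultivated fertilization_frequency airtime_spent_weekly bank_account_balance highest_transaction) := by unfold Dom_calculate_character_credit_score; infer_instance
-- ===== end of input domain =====

-- B replaces the four if/elif ladders by one shared threshold-table helper and the
-- membership-guarded crop loop by a sum over dict.get (objective: simpler). Equal return value proved everywhere.

-- ===== PORT A =====
def pvCropsPoints : PySem.Dict String Int :=
  PySem.Dict.ofList [("Legumes", 10), ("Cereals", 8), ("Fruits", 6), ("Tubers", 4)]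

def calculate_character_credit_score (crops_cultivated : List String) (fertilization_frequency : Int) (airtime_spent_weekly : Int) (bank_account_balance : Int) (highest_transaction : Int) : Int :=
  -- score = 0; for crop in crops_cultivated: if crop in crops_points: score += crops_points[crop]
  let score : Int := crops_cultivated.foldl
    (fun score crop =>
      if (PySem.Dict.get? pvCropsPoints crop).isSome then
        score + PySem.Dict.getD pvCropsPoints crop 0
      else score) 0
  let score := if fertilization_frequency ≤ 2 then score + 2
    else if fertilization_frequency ≤ 4 then score + 4
    else if fertilization_frequency ≤ 6 then score + 6
    else score + 8
  let score := if airtime_spent_weekly ≤ 500 then score + 1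
    else if airtime_spent_weekly ≤ 1000 then score + 2
    else if airtime_spent_weekly ≤ 2000 then score + 3
    else score + 4
  let score := if bank_account_balance ≤ 5000 then score + 1
    else if bank_account_balance ≤ 10000 then score + 2
    else if bank_account_balance ≤ 20000 then score + 3
    else score + 4
  let score := if highest_transaction ≤ 10000 then score + 1
    else if highest_transaction ≤ 50000 then score + 2
    else if highest_transaction ≤ 100000 then score + 3
    else score + 4
  score

-- ===== PORT B =====
-- _band(value, thresholds, points) = points[sum(1 for t in thresholds if t < value)]
def pvBand (value : Int) (thresholds : List Int) (points : List Int) : Int :=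
  points.getD (thresholds.countP (fun t => t < value)) 0

def calculate_character_credit_score_alt (crops_cultivated : List String) (fertilization_frequency : Int) (airtime_spent_weekly : Int) (bank_account_balance : Int) (highest_transaction : Int) : Int :=
  (crops_cultivated.map (fun c => PySem.Dict.getD pvCropsPoints c 0)).sum
  + pvBand fertilization_frequency [2, 4, 6] [2, 4, 6, 8]
  + pvBand airtime_spent_weekly [500, 1000, 2000] [1, 2, 3, 4]
  + pvBand bank_account_balance [5000, 10000, 20000] [1, 2, 3, 4]
  + pvBand highest_transaction [10000, 50000, 100000] [1, 2, 3, 4]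

-- ===== PRECONDITION & SPEC =====
def Spec_calculate_character_credit_score (crops_cultivated : List String) (fertilization_frequency : Int) (airtime_spent_weekly : Int) (bank_account_balance : Int) (highest_transaction : Int) (out : Int) : Prop := out = calculate_character_credit_score_alt crops_cultivated fertilization_frequency airtime_spent_weekly bank_account_balance highest_transaction
instance (crops_cultivated : List String) (fertilization_frequency : Int) (airtime_spent_weekly : Int) (bank_account_balance : Int) (highest_transaction : Int) (out : Int) : Decidable (Spec_calculate_character_credit_score crops_cultivated fertilization_frequency airtime_spent_weekly bank_account_balance highest_transaction out) := by unfold Spec_calculate_character_credit_score; infer_instance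

-- ===== CLAIM (what is proved, stated in full; the proofs are below) =====
def Claim_equal_calculate_character_credit_score : Prop := ∀ (crops_cultivated : List String) (fertilization_frequency : Int) (airtime_spent_weekly : Int) (bank_account_balance : Int) (highest_transaction : Int), Dom_calculate_character_credit_score crops_cultivated fertilization_frequency airtime_spent_weekly bank_account_balance highest_transaction → Spec_calculate_character_credit_score crops_cultivated fertilization_frequency airtime_spent_weekly bank_account_balance highest_transaction (calculate_character_credit_score crops_cultivated fertilization_frequency airtime_spent_weekly bank_account_balance highest_transaction)

-- ===== LEMMAS AND PROOFS =====

-- A's guarded crop step always adds getD _ 0 (0 when absent), so the loop is a sum.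
lemma crop_step (s : Int) (c : String) :
    (if (PySem.Dict.get? pvCropsPoints c).isSome then
        s + PySem.Dict.getD pvCropsPoints c 0
      else s) = s + PySem.Dict.getD pvCropsPoints c 0 := by
  by_cases h : (PySem.Dict.get? pvCropsPoints c).isSome
  · simp [h]
  · simp [h, PySem.Dict.getD]
    cases hg : PySem.Dict.get? pvCropsPoints c with
    | none => simp
    | some v => simp [hg] at h

lemma crop_fold (xs : List String) (a : Int) :
    xs.foldl (fun score crop =>
      if (PySem.Dict.get? pvCropsPoints crop).isSome then
        score + PySem.Dict.getD pvCropsPoints crop 0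
      else score) a
    = a + (xs.map (fun c => PySem.Dict.getD pvCropsPoints c 0)).sum := by
  induction xs generalizing a with
  | nil => simp
  | cons x xs ih =>
    rw [List.foldl_cons, crop_step, ih, List.map_cons, List.sum_cons]
    ring

lemma band_gen (v a b c p1 p2 p3 p4 : Int) (hab : a < b) (hbc : b < c) :
    pvBand v [a, b, c] [p1, p2, p3, p4]
      = if v ≤ a then p1 else if v ≤ b then p2 else if v ≤ c then p3 else p4 := by
  have hc : List.countP (fun t => decide (t < v)) [a, b, c]
      = (if a < v then 1 else 0) + ((if b < v then 1 else 0) + ((if c < v then 1 else 0) + 0)) := by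
    simp [List.countP_cons, List.countP_nil]
    omega
  simp only [pvBand, hc]
  split_ifs <;> first | rfl | omega

lemma ladder_pull (s x1 x2 x3 x4 : Int) (c1 c2 c3 : Prop)
    [Decidable c1] [Decidable c2] [Decidable c3] :
    (if c1 then s + x1 else if c2 then s + x2 else if c3 then s + x3 else s + x4)
      = s + (if c1 then x1 else if c2 then x2 else if c3 then x3 else x4) := by
  split_ifs <;> rfl

-- ===== VERDICT (by name: the statement is the Claim_ definition above) =====
theorem calculate_character_credit_score_spec : Claim_equal_calculate_character_credit_score := by
  intro crops f air bal tx _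
  show _ = _
  simp only [calculate_character_credit_score, calculate_character_credit_score_alt, crop_fold,
    band_gen f 2 4 6 2 4 6 8 (by norm_num) (by norm_num),
    band_gen air 500 1000 2000 1 2 3 4 (by norm_num) (by norm_num),
    band_gen bal 5000 10000 20000 1 2 3 4 (by norm_num) (by norm_num),
    band_gen tx 10000 50000 100000 1 2 3 4 (by norm_num) (by norm_num), ladder_pull]
  ring
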